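-- pv_equiv track=rewrite | github.com/duriantaco/fyn | scripts/normalize_release_notes.py | build_install_section
-- ===== SOURCE A (Python) =====
-- def build_install_section(tag: str, repo: str, assets: set[str]) -> str:
--     shell_asset = next((name for name in sorted(assets) if name.endswith(".sh")), None)
--     powershell_asset = next((name for name in sorted(assets) if name.endswith(".ps1")), None)
--
--     if not shell_asset and not powershell_asset:
--         return ""
--
--     lines = [f"## Install fyn {tag}", ""]
--     if shell_asset:
--         lines.extend(
--             [
--                 "### Install prebuilt binaries via shell script",
--                 "",
--                 "```sh",
--                 f"curl --proto '=https' --tlsv1.2 -LsSf https://github.com/{repo}/releases/download/{tag}/{shell_asset} | sh",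
--                 "```",
--                 "",
--             ]
--         )
--     if powershell_asset:
--         lines.extend(
--             [
--                 "### Install prebuilt binaries via powershell script",
--                 "",
--                 "```sh",
--                 f'powershell -ExecutionPolicy Bypass -c "irm https://github.com/{repo}/releases/download/{tag}/{powershell_asset} | iex"',
--                 "```",
--                 "",
--             ]
--         )
--     return "\n".join(lines).strip() + "\n\n"
-- ===== SOURCE B (Python) =====
-- def build_install_section(tag: str, repo: str, assets: set[str]) -> str:
--     shell_asset = None
--     powershell_asset = None
--     for name in assets:
--         if name.endswith(".sh") and (shell_asset is None or name < shell_asset):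
--             shell_asset = name
--         if name.endswith(".ps1") and (powershell_asset is None or name < powershell_asset):
--             powershell_asset = name
--
--     if shell_asset is None and powershell_asset is None:
--         return ""
--
--     shell_block = [] if shell_asset is None else [
--         "### Install prebuilt binaries via shell script",
--         "",
--         "```sh",
--         f"curl --proto '=https' --tlsv1.2 -LsSf https://github.com/{repo}/releases/download/{tag}/{shell_asset} | sh",
--         "```",
--         "",
--     ]
--     powershell_block = [] if powershell_asset is None else [
--         "### Install prebuilt binaries via powershell script",
--         "",
--         "```sh",
--         f'powershell -ExecutionPolicy Bypass -c "irm https://github.com/{repo}/releases/download/{tag}/{powershell_asset} | iex"',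
--         "```",
--         "",
--     ]
--     parts = [f"## Install fyn {tag}", ""] + shell_block + powershell_block
--     return "\n".join(parts).strip() + "\n\n"
-- ===== Notes on version B (the rewrite author's own statement) =====
-- stated objective: faster
-- what changed: Replaces the two sorted(assets)+next(...) lookups with a single linear pass over assets that tracks the lexicographically smallest '.sh' and '.ps1' names, and builds the line list by concatenating optional blocks instead of mutating extend calls.
import Mathlib
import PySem

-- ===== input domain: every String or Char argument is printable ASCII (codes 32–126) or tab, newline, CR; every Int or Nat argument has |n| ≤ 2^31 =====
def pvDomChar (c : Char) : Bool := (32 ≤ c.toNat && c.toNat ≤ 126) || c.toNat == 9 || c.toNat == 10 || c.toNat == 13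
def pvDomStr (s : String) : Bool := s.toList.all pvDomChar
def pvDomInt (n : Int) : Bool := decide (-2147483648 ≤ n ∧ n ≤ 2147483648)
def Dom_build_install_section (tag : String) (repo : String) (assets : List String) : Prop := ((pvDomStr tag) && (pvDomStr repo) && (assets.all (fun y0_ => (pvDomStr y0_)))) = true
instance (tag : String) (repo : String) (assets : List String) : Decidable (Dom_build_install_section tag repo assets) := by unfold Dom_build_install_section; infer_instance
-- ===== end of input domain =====

-- B replaces A's two sort-then-take-first lookups by one linear pass tracking the
-- lexicographically smallest ".sh" and ".ps1" asset names; the markdown glue is unchanged.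


-- ===== PORT A =====
-- Python truthiness of an Optional[str]: None and "" are falsy.
def pyTruthyStr (o : Option String) : Bool :=
  match o with
  | none => false
  | some s => !(s.toList.isEmpty)

def build_install_section (tag : String) (repo : String) (assets : List String) : String :=
  let shell_asset := (PySem.List.sorted assets (fun x => x) false).find? (fun name => PySem.Str.endswith name ".sh")
  let powershell_asset := (PySem.List.sorted assets (fun x => x) false).find? (fun name => PySem.Str.endswith name ".ps1")
  if !(pyTruthyStr shell_asset) && !(pyTruthyStr powershell_asset) then ""
  else
    let lines : List String := ["## Install fyn " ++ tag, ""]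
    let lines := if pyTruthyStr shell_asset then
      lines ++ [
        "### Install prebuilt binaries via shell script",
        "",
        "```sh",
        "curl --proto '=https' --tlsv1.2 -LsSf https://github.com/" ++ repo ++ "/releases/download/" ++ tag ++ "/" ++ shell_asset.getD "" ++ " | sh",
        "```",
        ""]
      else lines
    let lines := if pyTruthyStr powershell_asset then
      lines ++ [
        "### Install prebuilt binaries via powershell script",
        "",
        "```sh",
        "powershell -ExecutionPolicy Bypass -c \"irm https://github.com/" ++ repo ++ "/releases/download/" ++ tag ++ "/" ++ powershell_asset.getD "" ++ " | iex\"",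
        "```",
        ""]
      else lines
    PySem.Str.strip (PySem.Str.join "\n" lines) ++ "\n\n"

-- ===== PORT B =====
-- one update step of B's single scan: keep the lexicographically smallest name with p
def altTakeMin (p : String → Bool) (acc : Option String) (name : String) : Option String :=
  if p name then
    match acc with
    | none => some name
    | some cur => if name < cur then some name else cur
  else acc

def build_install_section_alt (tag : String) (repo : String) (assets : List String) : String :=
  let st := assets.foldl
    (fun (st : Option String × Option String) name =>
      (altTakeMin (fun n => PySem.Str.endswith n ".sh") st.1 name,
       altTakeMin (fun n => PySem.Str.endswith n ".ps1") st.2 name))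
    (none, none)
  if st.1.isNone && st.2.isNone then ""
  else
    let shell_block : List String := match st.1 with
      | none => []
      | some s => [
        "### Install prebuilt binaries via shell script",
        "",
        "```sh",
        "curl --proto '=https' --tlsv1.2 -LsSf https://github.com/" ++ repo ++ "/releases/download/" ++ tag ++ "/" ++ s ++ " | sh",
        "```",
        ""]
    let powershell_block : List String := match st.2 with
      | none => []
      | some s => [
        "### Install prebuilt binaries via powershell script",
        "",
        "```sh",
        "powershell -ExecutionPolicy Bypass -c \"irm https://github.com/" ++ repo ++ "/releases/download/" ++ tag ++ "/" ++ s ++ " | iex\"",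
        "```",
        ""]
    let parts := ["## Install fyn " ++ tag, ""] ++ shell_block ++ powershell_block
    PySem.Str.strip (PySem.Str.join "\n" parts) ++ "\n\n"

-- ===== PRECONDITION & SPEC =====
def Spec_build_install_section (tag : String) (repo : String) (assets : List String) (out : String) : Prop := out = build_install_section_alt tag repo assets
instance (tag : String) (repo : String) (assets : List String) (out : String) : Decidable (Spec_build_install_section tag repo assets out) := by unfold Spec_build_install_section; infer_instance

-- ===== CLAIM (what is proved, stated in full; the proofs are below) =====
def Claim_equal_build_install_section : Prop := ∀ (tag : String) (repo : String) (assets : List String), Dom_build_install_section tag repo assets → Spec_build_install_section tag repo assets (build_install_section tag repo assets)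

-- ===== LEMMAS AND PROOFS =====

-- o is the lexicographically least element of xs satisfying p (none iff there is none)
def IsMinP (p : String → Bool) (xs : List String) : Option String → Prop
  | none => ∀ y ∈ xs, p y = false
  | some m => m ∈ xs ∧ p m = true ∧ ∀ y ∈ xs, p y = true → m ≤ y

theorem IsMinP_unique (p : String → Bool) (xs : List String) (o1 o2 : Option String)
    (h1 : IsMinP p xs o1) (h2 : IsMinP p xs o2) : o1 = o2 := by
  match o1, o2 with
  | none, none => rfl
  | none, some m => exact absurd h2.2.1 (by simp [IsMinP] at h1; simp [h1 m h2.1])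
  | some m, none => exact absurd h1.2.1 (by simp [IsMinP] at h2; simp [h2 m h1.1])
  | some m1, some m2 =>
    obtain ⟨hm1, hp1, hle1⟩ := h1
    obtain ⟨hm2, hp2, hle2⟩ := h2
    exact congrArg some (le_antisymm (hle1 m2 hm2 hp2) (hle2 m1 hm1 hp1))

theorem IsMinP_weaken (p : String → Bool) (ys zs : List String) (o : Option String)
    (h : IsMinP p ys o) (hsub : ∀ y ∈ ys, y ∈ zs)
    (hcov : ∀ z ∈ zs, p z = true → ∃ y ∈ ys, p y = true ∧ y ≤ z) : IsMinP p zs o := by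
  match o with
  | none =>
    intro z hz
    by_contra hpz
    obtain ⟨y, hy, hpy, _⟩ := hcov z hz (by revert hpz; cases p z <;> simp)
    exact absurd hpy (by simp [h y hy])
  | some m =>
    obtain ⟨hm, hp, hle⟩ := h
    refine ⟨hsub m hm, hp, ?_⟩
    intro z hz hpz
    obtain ⟨y, hy, hpy, hyz⟩ := hcov z hz hpz
    exact le_trans (hle y hy hpy) hyz

theorem find?_sorted_isMin (p : String → Bool) (s : List String)
    (hs : s.Pairwise (· ≤ ·)) : IsMinP p s (s.find? p) := by
  induction s with
  | nil => intro y hy; simp at hy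
  | cons a t ih =>
    by_cases hpa : p a = true
    · simp only [List.find?_cons, hpa]
      refine ⟨List.mem_cons_self, hpa, ?_⟩
      intro y hy _
      rcases List.mem_cons.mp hy with h | h
      · exact le_of_eq h.symm
      · exact (List.pairwise_cons.mp hs).1 y h
    · have hpa' : p a = false := by revert hpa; cases p a <;> simp
      simp only [List.find?_cons, hpa']
      have ht := ih (List.pairwise_cons.mp hs).2
      match hfind : t.find? p with
      | none =>
        rw [hfind] at ht
        intro y hy
        rcases List.mem_cons.mp hy with h | h
        · exact h ▸ hpa'
        · exact ht y h
      | some m =>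
        rw [hfind] at ht
        obtain ⟨hm, hp, hle⟩ := ht
        refine ⟨List.mem_cons_of_mem a hm, hp, ?_⟩
        intro y hy hpy
        rcases List.mem_cons.mp hy with h | h
        · exact absurd (h ▸ hpy) (by simp [hpa'])
        · exact hle y h hpy

-- invariant of B's scan: starting from an accumulator that is the min of its own singleton
theorem foldl_takeMin_spec (p : String → Bool) :
    ∀ (xs : List String) (acc : Option String), IsMinP p acc.toList acc →
      IsMinP p (acc.toList ++ xs) (xs.foldl (altTakeMin p) acc) := by
  intro xs
  induction xs with
  | nil => intro acc hacc; simpa using hacc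
  | cons a t ih =>
    intro acc hacc
    have hstep : IsMinP p (altTakeMin p acc a).toList (altTakeMin p acc a) := by
      by_cases hpa : p a = true
      · match acc with
        | none => simp [altTakeMin, hpa, IsMinP]
        | some cur =>
          by_cases hlt : a < cur
          · simp [altTakeMin, hpa, hlt, IsMinP]
          · simpa [altTakeMin, hpa, hlt, IsMinP] using hacc
      · have hpa' : p a = false := by revert hpa; cases p a <;> simp
        simpa [altTakeMin, hpa'] using hacc
    have hres := ih (altTakeMin p acc a) hstep
    rw [List.foldl_cons]
    refine IsMinP_weaken p ((altTakeMin p acc a).toList ++ t) (acc.toList ++ a :: t) _ hres ?_ ?_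
    · intro y hy
      rcases List.mem_append.mp hy with h | h
      · by_cases hpa : p a = true
        · match acc with
          | none =>
            simp [altTakeMin, hpa] at h
            simp [h]
          | some cur =>
            by_cases hlt : a < cur
            · simp [altTakeMin, hpa, hlt] at h; simp [h]
            · simp [altTakeMin, hpa, hlt] at h; simp [h]
        · have hpa' : p a = false := by revert hpa; cases p a <;> simp
          cases hc : acc with
          | none => rw [hc] at h; simp [altTakeMin, hpa'] at h
          | some cur => rw [hc] at h; simp [altTakeMin, hpa'] at h; simp [h]
      · simp [h]
    · intro z hz hpz
      -- every p-element of acc.toList ++ a :: t is dominated by a p-element of the new list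
      rcases List.mem_append.mp hz with h | h
      · -- z is acc's element
        cases hc : acc with
        | none => rw [hc] at h; simp at h
        | some cur =>
          rw [hc] at h; simp at h
          by_cases hpa : p a = true
          · by_cases hlt : a < cur
            · exact ⟨a, by simp [altTakeMin, hpa, hlt], hpa, h ▸ le_of_lt hlt⟩
            · exact ⟨z, by simp [altTakeMin, hpa, hlt, h], hpz, le_refl z⟩
          · have hpa' : p a = false := by revert hpa; cases p a <;> simp
            exact ⟨z, by simp [altTakeMin, hpa', h], hpz, le_refl z⟩
      · rcases List.mem_cons.mp h with h | h
        · -- z = a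
          subst h
          match acc with
          | none => exact ⟨z, by simp [altTakeMin, hpz], hpz, le_refl z⟩
          | some cur =>
            by_cases hlt : z < cur
            · exact ⟨z, by simp [altTakeMin, hpz, hlt], hpz, le_refl z⟩
            · refine ⟨cur, by simp [altTakeMin, hpz, hlt], ?_, not_lt.mp hlt⟩
              · have := hacc
                exact this.2.1
        · exact ⟨z, by simp [h], hpz, le_refl z⟩

-- the two selection strategies agree
theorem select_eq (p : String → Bool) (xs : List String) :
    xs.foldl (altTakeMin p) none = (PySem.List.sorted xs (fun x => x) false).find? p := by
  apply IsMinP_unique p xs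
  · have h := foldl_takeMin_spec p xs none (by intro y hy; simp at hy)
    simpa using h
  · have hpair : (PySem.List.sorted xs (fun x => x) false).Pairwise (· ≤ ·) := by
      simpa using PySem.List.sorted_pairwise xs (fun x => x)
    have h := find?_sorted_isMin p (PySem.List.sorted xs (fun x => x) false) hpair
    refine IsMinP_weaken p _ xs _ h ?_ ?_
    · intro y hy; exact (PySem.List.mem_sorted xs (fun x => x) false y).mp hy
    · intro z hz hpz
      exact ⟨z, (PySem.List.mem_sorted xs (fun x => x) false z).mpr hz, hpz, le_refl z⟩

-- a name selected by the scan satisfies p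
theorem foldl_takeMin_sat (p : String → Bool) (xs : List String) (m : String)
    (h : xs.foldl (altTakeMin p) none = some m) : p m = true := by
  have hmin := foldl_takeMin_spec p xs none (by intro y hy; simp at hy)
  simp only [Option.toList_none, List.nil_append] at hmin
  rw [h] at hmin
  exact hmin.2.1

theorem endswith_ne_empty (m sfx : String) (hsfx : sfx.toList ≠ [])
    (h : PySem.Str.endswith m sfx = true) : m.toList.isEmpty = false := by
  have h' : sfx.toList <:+ m.toList := (PySem.Chars.endswith_iff _ _).mp (by simpa using h)
  obtain ⟨pre, hpre⟩ := h'
  cases hm : m.toList with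
  | nil => rw [hm] at hpre; rcases List.append_eq_nil_iff.mp hpre with ⟨_, h2⟩; exact absurd h2 hsfx
  | cons _ _ => simp

-- B's pair fold is the pair of the two scans
theorem pair_fold_eq (assets : List String) :
    assets.foldl
      (fun (st : Option String × Option String) name =>
        (altTakeMin (fun n => PySem.Str.endswith n ".sh") st.1 name,
         altTakeMin (fun n => PySem.Str.endswith n ".ps1") st.2 name))
      (none, none)
    = (assets.foldl (altTakeMin (fun n => PySem.Str.endswith n ".sh")) none,
       assets.foldl (altTakeMin (fun n => PySem.Str.endswith n ".ps1")) none) := by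
  induction assets using List.reverseRecOn with
  | nil => rfl
  | append_singleton t a ih => simp only [List.foldl_append, ih, List.foldl_cons, List.foldl_nil]

-- ===== VERDICT (by name: the statement is the Claim_ definition above) =====
theorem build_install_section_spec : Claim_equal_build_install_section := by
  intro tag repo assets _
  unfold Spec_build_install_section build_install_section build_install_section_alt
  rw [pair_fold_eq]
  rw [← select_eq (fun n => PySem.Str.endswith n ".sh") assets,
      ← select_eq (fun n => PySem.Str.endswith n ".ps1") assets]
  match hsh : assets.foldl (altTakeMin (fun n => PySem.Str.endswith n ".sh")) none,
        hps : assets.foldl (altTakeMin (fun n => PySem.Str.endswith n ".ps1")) none with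
  | none, none => simp [pyTruthyStr]
  | some s, none =>
    have hne := endswith_ne_empty s ".sh" (by decide) (foldl_takeMin_sat (fun n => PySem.Str.endswith n ".sh") assets _ hsh)
    simp [pyTruthyStr, hne]
  | none, some s =>
    have hne := endswith_ne_empty s ".ps1" (by decide) (foldl_takeMin_sat (fun n => PySem.Str.endswith n ".ps1") assets _ hps)
    simp [pyTruthyStr, hne]
  | some s1, some s2 =>
    have hne1 := endswith_ne_empty s1 ".sh" (by decide) (foldl_takeMin_sat (fun n => PySem.Str.endswith n ".sh") assets _ hsh)
    have hne2 := endswith_ne_empty s2 ".ps1" (by decide) (foldl_takeMin_sat (fun n => PySem.Str.endswith n ".ps1") assets _ hps)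
    simp [pyTruthyStr, hne1, hne2]
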